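-- pv_equiv track=rewrite | github.com/YaroslavPavlovich/pose-checking | utils/create_labels.py | mix_data
-- ===== SOURCE A (Python) =====
-- def mix_data(normal_points: [], not_normal_points: []) -> ([], []):
--     train_data = []
--     train_labels = []
--     while len(normal_points) != 0 or len(not_normal_points) != 0:
--         if len(normal_points) > 0:
--             train_data.append(normal_points.pop())
--             train_labels.append([1])
--         if len(not_normal_points) > 0:
--             train_data.append(not_normal_points.pop())
--             train_labels.append([0])
--     return train_data, train_labels
-- ===== SOURCE B (Python) =====
-- def mix_data(normal_points: [], not_normal_points: []) -> ([], []):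
--     # B consumes reversed copies with one zip pass over the common prefix plus a
--     # bulk tail, instead of A's mutate-by-pop while loop; like A it empties both
--     # argument lists (clear() reproduces A's mutation side effect).
--     rn = normal_points[::-1]
--     rm = not_normal_points[::-1]
--     normal_points.clear()
--     not_normal_points.clear()
--     k = min(len(rn), len(rm))
--     data = []
--     for a, b in zip(rn, rm):
--         data.append(a)
--         data.append(b)
--     labels = [[1], [0]] * k
--     if len(rn) > k:
--         data += rn[k:]
--         labels += [[1]] * (len(rn) - k)
--     else:
--         data += rm[k:]
--         labels += [[0]] * (len(rm) - k)
--     return data, labels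
-- ===== Notes on version B (the rewrite author's own statement) =====
-- stated objective: alternative
-- what changed: Replaced the destructive while-loop that pops one element off each input list per iteration with a single zip pass over reversed copies (pairs get labels [1],[0]) followed by a bulk tail extension and label replication; both input lists are still emptied via clear() to keep A's mutation side effect.
import Mathlib
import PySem

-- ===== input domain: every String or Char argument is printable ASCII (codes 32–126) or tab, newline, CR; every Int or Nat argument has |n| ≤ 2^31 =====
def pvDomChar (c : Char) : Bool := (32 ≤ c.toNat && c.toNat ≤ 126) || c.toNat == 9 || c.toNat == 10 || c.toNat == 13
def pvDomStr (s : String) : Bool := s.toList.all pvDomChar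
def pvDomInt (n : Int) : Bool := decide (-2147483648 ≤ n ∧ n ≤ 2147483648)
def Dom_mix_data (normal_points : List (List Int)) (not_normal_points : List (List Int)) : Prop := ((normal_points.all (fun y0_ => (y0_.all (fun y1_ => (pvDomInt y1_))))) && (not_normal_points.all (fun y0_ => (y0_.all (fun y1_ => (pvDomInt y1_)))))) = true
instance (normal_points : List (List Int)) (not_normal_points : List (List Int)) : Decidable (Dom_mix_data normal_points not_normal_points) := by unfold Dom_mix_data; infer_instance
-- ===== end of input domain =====

-- B replaces A's mutate-by-pop while loop with one zip pass over reversed copies plus a bulk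
-- tail; equivalence proved for the RETURN value (both Pythons also empty the argument lists).


-- ===== PORT A =====
-- A's while loop: each iteration pops the last element of each nonempty input list
-- (pop on a guarded-nonempty list is exactly getLast?/dropLast) and appends to the
-- accumulators; the while-condition plus the two inline ifs become the case analysis.
def mixLoop (np nnp data labels : List (List Int)) : List (List Int) × List (List Int) :=
  if 0 < np.length then
    if 0 < nnp.length then
      mixLoop np.dropLast nnp.dropLast
        (data ++ [np.getLast?.getD [], nnp.getLast?.getD []]) (labels ++ [[1], [0]])
    else
      mixLoop np.dropLast nnp (data ++ [np.getLast?.getD []]) (labels ++ [[1]])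
  else
    if 0 < nnp.length then
      mixLoop np nnp.dropLast (data ++ [nnp.getLast?.getD []]) (labels ++ [[0]])
    else (data, labels)
termination_by np.length + nnp.length
decreasing_by all_goals simp [List.length_dropLast]; omega

def mix_data (normal_points : List (List Int)) (not_normal_points : List (List Int)) : List (List Int) × List (List Int) :=
  mixLoop normal_points not_normal_points [] []

-- ===== PORT B =====
-- transliteration of Source B: reversed copies, one zip pass, label replication, bulk tail.
-- xs[::-1] = List.reverse; xs[k:] with 0 ≤ k = List.drop k; [x]*k = List.replicate; exact here.
def mix_data_alt (normal_points : List (List Int)) (not_normal_points : List (List Int)) : List (List Int) × List (List Int) :=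
  let rn := normal_points.reverse
  let rm := not_normal_points.reverse
  let k := min rn.length rm.length
  let data := (rn.zip rm).foldl (fun acc p => acc ++ [p.1, p.2]) []
  let labels := (List.replicate k ([[1], [0]] : List (List Int))).flatten
  if rn.length > k then
    (data ++ rn.drop k, labels ++ List.replicate (rn.length - k) [1])
  else
    (data ++ rm.drop k, labels ++ List.replicate (rm.length - k) [0])

-- ===== PRECONDITION & SPEC =====
def Spec_mix_data (normal_points : List (List Int)) (not_normal_points : List (List Int)) (out : List (List Int) × List (List Int)) : Prop := out = mix_data_alt normal_points not_normal_points
instance (normal_points : List (List Int)) (not_normal_points : List (List Int)) (out : List (List Int) × List (List Int)) : Decidable (Spec_mix_data normal_points not_normal_points out) := by unfold Spec_mix_data; infer_instance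

-- ===== CLAIM (what is proved, stated in full; the proofs are below) =====
def Claim_equal_mix_data : Prop := ∀ (normal_points : List (List Int)) (not_normal_points : List (List Int)), Dom_mix_data normal_points not_normal_points → Spec_mix_data normal_points not_normal_points (mix_data normal_points not_normal_points)

-- ===== LEMMAS AND PROOFS =====

-- the common mathematical description: interleave with labels, head-first over the reversed lists
def specData : List (List Int) → List (List Int) → List (List Int)
  | a :: rn, b :: rm => a :: b :: specData rn rm
  | a :: rn, [] => a :: specData rn []
  | [], rm => rm

def specLabels : List (List Int) → List (List Int) → List (List Int)
  | _ :: rn, _ :: rm => [1] :: [0] :: specLabels rn rm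
  | _ :: rn, [] => [1] :: specLabels rn []
  | [], _ :: rm => [0] :: specLabels [] rm
  | [], [] => []

theorem specData_nil_right : ∀ rn : List (List Int), specData rn [] = rn
  | [] => rfl
  | _ :: rn => by simp [specData, specData_nil_right rn]

theorem specLabels_nil_right : ∀ rn : List (List Int), specLabels rn [] = List.replicate rn.length [1]
  | [] => by simp [specLabels]
  | _ :: rn => by simp [specLabels, specLabels_nil_right rn, List.replicate_succ]

theorem specLabels_nil_left : ∀ rm : List (List Int), specLabels [] rm = List.replicate rm.length [0]
  | [] => by simp [specLabels]
  | _ :: rm => by simp [specLabels, specLabels_nil_left rm, List.replicate_succ]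

-- A's loop, driven on reversed lists, computes the spec appended to the accumulators
theorem mixLoop_nil_left : ∀ (rm d l : List (List Int)),
    mixLoop [] rm.reverse d l = (d ++ rm, l ++ List.replicate rm.length [0])
  | [], d, l => by simp [mixLoop]
  | b :: rm, d, l => by
    rw [mixLoop]
    simp [mixLoop_nil_left rm (d ++ [b]) (l ++ [[0]]),
      List.replicate_succ]

theorem mixLoop_spec : ∀ (rn rm d l : List (List Int)),
    mixLoop rn.reverse rm.reverse d l = (d ++ specData rn rm, l ++ specLabels rn rm)
  | [], rm, d, l => by
    simpa [specData, specLabels_nil_left] using mixLoop_nil_left rm d l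
  | a :: rn, [], d, l => by
    rw [mixLoop]
    have ih := mixLoop_spec rn [] (d ++ [a]) (l ++ [[1]])
    simp only [List.reverse_nil] at ih
    simp [ih, specData, specLabels]
  | a :: rn, b :: rm, d, l => by
    rw [mixLoop]
    simp [mixLoop_spec rn rm (d ++ [a, b]) (l ++ [[1], [0]]),
      specData, specLabels]

-- B's body computes the same spec
theorem foldl_zip_pairs : ∀ (rn rm : List (List Int)) (acc : List (List Int)),
    (rn.zip rm).foldl (fun acc p => acc ++ [p.1, p.2]) acc
      = acc ++ (rn.zip rm).flatMap (fun p => [p.1, p.2])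
  | [], _, acc => by simp
  | _ :: _, [], acc => by simp
  | a :: rn, b :: rm, acc => by
    simp [List.zip_cons_cons, List.foldl_cons, foldl_zip_pairs rn rm (acc ++ [a, b])]

theorem alt_core : ∀ (rn rm : List (List Int)),
    mix_data_alt rn.reverse rm.reverse = (specData rn rm, specLabels rn rm)
  | [], rm => by
    simp [mix_data_alt, specData, specLabels_nil_left]
  | a :: rn, [] => by
    simp [mix_data_alt, specData_nil_right, specLabels_nil_right]
  | a :: rn, b :: rm => by
    have ih := alt_core rn rm
    simp only [mix_data_alt, List.reverse_reverse] at ih ⊢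
    simp only [List.length_cons, List.zip_cons_cons, List.foldl_cons,
      foldl_zip_pairs, List.nil_append] at ih ⊢
    have hmin : min (rn.length + 1) (rm.length + 1) = min rn.length rm.length + 1 := by omega
    rw [hmin]
    simp only [List.replicate_succ, List.flatten_cons, List.drop_succ_cons,
      specData, specLabels]
    by_cases h : rn.length > min rn.length rm.length
    · simp only [if_pos h, Prod.mk.injEq] at ih
      have h' : rn.length + 1 > min rn.length rm.length + 1 := by omega
      have hsub : rn.length + 1 - (min rn.length rm.length + 1) = rn.length - min rn.length rm.length := by omega
      simp only [gt_iff_lt, if_pos h', hsub, Prod.mk.injEq]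
      refine ⟨?_, ?_⟩ <;> simp [ih.1, ih.2]
    · simp only [if_neg h, Prod.mk.injEq] at ih
      have h' : ¬ rn.length + 1 > min rn.length rm.length + 1 := by omega
      have hsub : rm.length + 1 - (min rn.length rm.length + 1) = rm.length - min rn.length rm.length := by omega
      simp only [gt_iff_lt, if_neg h', hsub, Prod.mk.injEq]
      refine ⟨?_, ?_⟩ <;> simp [ih.1, ih.2]

-- ===== VERDICT (by name: the statement is the Claim_ definition above) =====
theorem mix_data_spec : Claim_equal_mix_data := by
  intro np nnp _
  unfold Spec_mix_data mix_data
  have h1 := mixLoop_spec np.reverse nnp.reverse [] []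
  have h2 := alt_core np.reverse nnp.reverse
  simp only [List.reverse_reverse] at h1 h2
  simp [h1, h2]
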